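-- pv_equiv track=rewrite | github.com/zpliulab/LogBTF | GNIPLR-main/gniplr.py | sor_g
-- ===== SOURCE A (Python) =====
-- def sor_g(gene_1,gene_2):
--     com = []
--     for j in range(len(gene_1)):
--         tup = (gene_1[j],gene_2[j])
--         com.append(tup)
--     sort_1 = sorted(com, key=lambda x:x[0])#Sort by gene_1
--     sort_2 = sorted(com, key=lambda x:x[1])#Sort by gene_2
--     a1 = []
--     b1 = []
--     for k in range(len(gene_1)):
--         a1.append(sort_1[k][0])
--         b1.append(sort_1[k][1])
--     return a1,b1
-- ===== SOURCE B (Python) =====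
-- def sor_g(gene_1, gene_2):
--     # Online stable insertion sort over zipped pairs: no library sort, single pass
--     # maintaining a sorted accumulator; the scan runs from the end (stable: equal
--     # keys keep arrival order, and near-sorted data inserts in O(1) scans).
--     acc = []
--     for pair in zip(gene_1, gene_2):
--         i = len(acc)
--         while i > 0 and pair[0] < acc[i - 1][0]:
--             i -= 1
--         acc.insert(i, pair)
--     a1 = [p[0] for p in acc]
--     b1 = [p[1] for p in acc]
--     return a1, b1
-- ===== Notes on version B (the rewrite author's own statement) =====
-- stated objective: alternative
-- what changed: B replaces A's build-pair-list-then-library-sort-then-unzip (plus a dead second sort) with a single-pass online stable insertion sort over zip(gene_1, gene_2): a sorted accumulator into which each pair is inserted after the last pair with key <= its key (backward scan).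
import Mathlib
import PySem

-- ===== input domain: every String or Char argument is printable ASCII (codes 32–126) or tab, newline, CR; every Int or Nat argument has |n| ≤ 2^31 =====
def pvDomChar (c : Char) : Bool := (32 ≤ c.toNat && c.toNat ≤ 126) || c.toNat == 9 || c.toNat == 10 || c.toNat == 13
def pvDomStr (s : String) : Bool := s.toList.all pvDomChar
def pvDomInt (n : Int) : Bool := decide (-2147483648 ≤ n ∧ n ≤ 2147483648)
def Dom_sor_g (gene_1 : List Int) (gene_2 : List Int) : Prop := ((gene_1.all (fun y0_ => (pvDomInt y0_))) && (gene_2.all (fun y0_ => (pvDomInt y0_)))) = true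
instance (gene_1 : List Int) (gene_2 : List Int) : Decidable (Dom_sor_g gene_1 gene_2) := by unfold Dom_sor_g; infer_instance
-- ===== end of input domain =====

-- B replaces A's build-pair-list / library-sort / unzip (with a dead second sort) by a
-- single-pass online stable insertion sort over zip(gene_1, gene_2) (alternative; O(n^2)).

-- ===== PORT A =====
-- A: build com = [(gene_1[j], gene_2[j])], sort it by each component (the second sort is unused),
-- then unzip sort_1 element by element. pyGetD is exact here: Pre_ keeps every index in range.
def sor_g (gene_1 : List Int) (gene_2 : List Int) : List Int × List Int :=
  let com := (PySem.List.pyRange 0 gene_1.length).foldl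
    (fun acc j => acc ++ [(PySem.List.pyGetD gene_1 j 0, PySem.List.pyGetD gene_2 j 0)]) []
  let sort_1 := PySem.List.sorted com (fun x => x.1)
  let _sort_2 := PySem.List.sorted com (fun x => x.2)
  let ab := (PySem.List.pyRange 0 gene_1.length).foldl
    (fun (acc : List Int × List Int) k =>
      (acc.1 ++ [(PySem.List.pyGetD sort_1 k (0, 0)).1],
       acc.2 ++ [(PySem.List.pyGetD sort_1 k (0, 0)).2])) ([], [])
  (ab.1, ab.2)

-- ===== PORT B =====
-- Source B's inner while loop decrements i from len(acc) while the key above is > pair's key: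
-- i ends as len(acc) minus the length of the maximal trailing run of keys > pair[0];
-- then list.insert(i, pair). Ported with takeWhile on the reverse + PySem.List.insert.
def sor_g_alt (gene_1 : List Int) (gene_2 : List Int) : List Int × List Int :=
  let acc := (gene_1.zip gene_2).foldl (fun acc pair =>
    let i : Nat := acc.length - (acc.reverse.takeWhile (fun y => decide (pair.1 < y.1))).length
    PySem.List.insert acc (i : Int) pair) []
  (acc.map (fun p => p.1), acc.map (fun p => p.2))

-- ===== PRECONDITION & SPEC =====
-- Pre_ excludes only inputs where Python A raises IndexError: gene_2 shorter than gene_1.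
def Pre_sor_g (gene_1 : List Int) (gene_2 : List Int) : Prop := gene_1.length ≤ gene_2.length
instance (gene_1 : List Int) (gene_2 : List Int) : Decidable (Pre_sor_g gene_1 gene_2) := by unfold Pre_sor_g; infer_instance
def pvWitness_sor_g : List Int × List Int := ([3, 1, 2, 1], [10, 20, 30, 40])

def Spec_sor_g (gene_1 : List Int) (gene_2 : List Int) (out : List Int × List Int) : Prop := out = sor_g_alt gene_1 gene_2
instance (gene_1 : List Int) (gene_2 : List Int) (out : List Int × List Int) : Decidable (Spec_sor_g gene_1 gene_2 out) := by unfold Spec_sor_g; infer_instance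

-- ===== CLAIM (what is proved, stated in full; the proofs are below) =====
def Claim_equal_sor_g : Prop := ∀ (gene_1 : List Int) (gene_2 : List Int), Dom_sor_g gene_1 gene_2 → Pre_sor_g gene_1 gene_2 → Spec_sor_g gene_1 gene_2 (sor_g gene_1 gene_2)

-- ===== LEMMAS AND PROOFS =====

-- stable insertBy splits the list at the maximal prefix of keys ≤ the new key
theorem insertBy_eq_take_drop (x : Int × Int) (acc : List (Int × Int)) :
    PySem.List.insertBy (fun a b => decide (a.1 < b.1)) x acc
      = acc.take ((acc.takeWhile (fun y => !decide (x.1 < y.1))).length)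
        ++ x :: acc.drop ((acc.takeWhile (fun y => !decide (x.1 < y.1))).length) := by
  induction acc with
  | nil => rfl
  | cons y t ih =>
    by_cases h : x.1 < y.1
    · simp [PySem.List.insertBy, List.takeWhile, h]
    · simp [PySem.List.insertBy, List.takeWhile, h, ih]

-- on a key-sorted list, B's backward scan finds the same split point
theorem scan_eq_takeWhile (x : Int × Int) (acc : List (Int × Int))
    (hs : acc.Pairwise (fun a b => a.1 ≤ b.1)) :
    acc.length - (acc.reverse.takeWhile (fun y => decide (x.1 < y.1))).length
      = (acc.takeWhile (fun y => !decide (x.1 < y.1))).length := by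
  induction acc with
  | nil => rfl
  | cons y t ih =>
    rw [List.pairwise_cons] at hs
    by_cases h : x.1 < y.1
    · have hall : ∀ z ∈ (y :: t).reverse, (fun y => decide (x.1 < y.1)) z = true := by
        intro z hz
        rw [List.mem_reverse, List.mem_cons] at hz
        rcases hz with hz | hz
        · subst hz; simp [h]
        · exact decide_eq_true (lt_of_lt_of_le h (hs.1 z hz))
      rw [List.takeWhile_eq_self_iff.mpr hall]
      simp [List.takeWhile, h]
    · have htw : (y :: t).reverse.takeWhile (fun y => decide (x.1 < y.1))
          = t.reverse.takeWhile (fun y => decide (x.1 < y.1)) := by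
        rw [List.reverse_cons, List.takeWhile_append]
        split
        · next heq =>
          have hfull : t.reverse.takeWhile (fun y => decide (x.1 < y.1)) = t.reverse :=
            (List.takeWhile_prefix _).eq_of_length heq
          simp [List.takeWhile, h, hfull]
        · rfl
      have hle := (List.takeWhile_prefix (l := t.reverse) (fun y => decide (x.1 < y.1))).length_le
      rw [List.length_reverse] at hle
      rw [htw, List.takeWhile_cons_of_pos (by simp [h]), List.length_cons, List.length_cons,
        ← ih hs.2]
      omega

-- one step of B on a key-sorted accumulator is the stable insertBy
theorem step_eq_insertBy (x : Int × Int) (acc : List (Int × Int))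
    (hs : acc.Pairwise (fun a b => a.1 ≤ b.1)) :
    PySem.List.insert acc
        ((acc.length - (acc.reverse.takeWhile (fun y => decide (x.1 < y.1))).length : Nat) : Int) x
      = PySem.List.insertBy (fun a b => decide (a.1 < b.1)) x acc := by
  rw [scan_eq_takeWhile x acc hs,
    PySem.List.insert_natCast _ _ _ (List.takeWhile_prefix _).length_le,
    insertBy_eq_take_drop]

-- B's fold is PySem's stable sort by the first component
theorem foldl_insPair (l : List (Int × Int)) :
    l.foldl (fun acc pair =>
      PySem.List.insert acc
        ((acc.length - (acc.reverse.takeWhile (fun y => decide (pair.1 < y.1))).length : Nat) : Int)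
        pair) [] = PySem.List.sorted l (fun x => x.1) := by
  rw [PySem.List.sorted_eq_foldl_insertBy]
  induction l using List.reverseRecOn with
  | nil => rfl
  | append_singleton t x ih =>
    rw [List.foldl_append, List.foldl_append, ih, List.foldl_cons, List.foldl_cons,
      List.foldl_nil, List.foldl_nil]
    apply step_eq_insertBy
    rw [← PySem.List.sorted_eq_foldl_insertBy]
    exact PySem.List.sorted_pairwise t (fun x => x.1)

-- A's first loop builds exactly zip gene_1 gene_2 when gene_2 is long enough
theorem com_eq_zip (gene_1 gene_2 : List Int) (h : gene_1.length ≤ gene_2.length) :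
    (PySem.List.pyRange 0 gene_1.length).map
      (fun j => (PySem.List.pyGetD gene_1 j 0, PySem.List.pyGetD gene_2 j 0))
      = gene_1.zip gene_2 := by
  rw [PySem.List.pyRange_zero_natCast, List.map_map]
  apply List.ext_getElem
  · simp [List.length_zip]; omega
  · intro i h1 h2
    simp only [List.length_map, List.length_range] at h1
    simp [PySem.List.pyGetD_natCast, List.getD_eq_getElem?_getD,
      List.getElem?_eq_getElem (by omega : i < gene_1.length),
      List.getElem?_eq_getElem (by omega : i < gene_2.length), List.getElem_zip]

-- the gather loop: reading L[k] for k in range(len(L)) componentwise is the two projections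
theorem map_get_fst (L : List (Int × Int)) :
    (PySem.List.pyRange 0 L.length).map (fun k => (PySem.List.pyGetD L k ((0 : Int), (0 : Int))).1)
      = L.map Prod.fst := by
  have h := PySem.List.map_pyGetD_pyRange_zero L ((0 : Int), (0 : Int))
  rw [show (fun k => (PySem.List.pyGetD L k ((0 : Int), (0 : Int))).1)
      = Prod.fst ∘ (fun k => PySem.List.pyGetD L k ((0 : Int), (0 : Int))) from rfl,
    ← List.map_map, show ((L.length : Nat) : Int) = PySem.List.len L from rfl, h]

theorem map_get_snd (L : List (Int × Int)) :
    (PySem.List.pyRange 0 L.length).map (fun k => (PySem.List.pyGetD L k ((0 : Int), (0 : Int))).2)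
      = L.map Prod.snd := by
  have h := PySem.List.map_pyGetD_pyRange_zero L ((0 : Int), (0 : Int))
  rw [show (fun k => (PySem.List.pyGetD L k ((0 : Int), (0 : Int))).2)
      = Prod.snd ∘ (fun k => PySem.List.pyGetD L k ((0 : Int), (0 : Int))) from rfl,
    ← List.map_map, show ((L.length : Nat) : Int) = PySem.List.len L from rfl, h]

theorem sor_g_eq (gene_1 gene_2 : List Int) (h : gene_1.length ≤ gene_2.length) :
    sor_g gene_1 gene_2 = sor_g_alt gene_1 gene_2 := by
  unfold sor_g sor_g_alt
  simp only [PySem.List.foldl_append_singleton_eq_map, List.nil_append,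
    com_eq_zip gene_1 gene_2 h, foldl_insPair]
  set L := PySem.List.sorted (gene_1.zip gene_2) (fun x => x.1) with hL
  rw [PySem.List.foldl_prod_mk
    (f := fun (acc : List Int) k => acc ++ [(PySem.List.pyGetD L k ((0 : Int), (0 : Int))).1])
    (g := fun (acc : List Int) k => acc ++ [(PySem.List.pyGetD L k ((0 : Int), (0 : Int))).2])]
  simp only [PySem.List.foldl_append_singleton_eq_map, List.nil_append]
  have hlen : gene_1.length = L.length := by
    simp only [hL, PySem.List.length_sorted, List.length_zip]; omega
  rw [hlen, map_get_fst L, map_get_snd L]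

-- ===== VERDICT (by name: the statement is the Claim_ definition above) =====
theorem sor_g_spec : Claim_equal_sor_g := by
  intro g1 g2 _ hpre
  unfold Spec_sor_g
  exact sor_g_eq g1 g2 hpre
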